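-- pv_equiv track=rewrite | github.com/faical-allou/gchallenge | kickstart/roundA1_kickstart.py | solve
-- ===== SOURCE A (Python) =====
-- def solve(n,p,s):
--     s.sort()
--     sum_s = [0]*(n-p+1)
--     max_s = [0]*(n-p+1)
--     work_s = [0]*(n-p+1)
--     for i in range(n-p+1):
--         sum_s[i]= sum(s[i+j] for j in range(0,p))
--         max_s[i]= s[i+p-1]
--         work_s[i] = max_s[i]*p - sum_s[i]
--     return min(work_s)
-- ===== SOURCE B (Python) =====
-- def solve(n, p, s):
--     t = sorted(s)
--     pref = [0]
--     for x in t: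
--         pref.append(pref[-1] + x)
--     best = None
--     for i in range(n - p + 1):
--         w = t[i + p - 1] * p - (pref[i + p] - pref[i])
--         if best is None or w < best:
--             best = w
--     return best
-- ===== Notes on version B (the rewrite author's own statement) =====
-- stated objective: faster
-- what changed: Replaced the O(p) inner generator-sum per window with a prefix-sum array built once, so each window cost is O(1), and replaced the three preallocated arrays + min(list) with a single running-minimum pass.
-- outside the precondition, e.g. on solve(3, -1, [5, 1, 2]): A returns -5, B raises IndexError; on solve(-1, -1, [0, 1]): A returns 0, B returns -1
import Mathlib
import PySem

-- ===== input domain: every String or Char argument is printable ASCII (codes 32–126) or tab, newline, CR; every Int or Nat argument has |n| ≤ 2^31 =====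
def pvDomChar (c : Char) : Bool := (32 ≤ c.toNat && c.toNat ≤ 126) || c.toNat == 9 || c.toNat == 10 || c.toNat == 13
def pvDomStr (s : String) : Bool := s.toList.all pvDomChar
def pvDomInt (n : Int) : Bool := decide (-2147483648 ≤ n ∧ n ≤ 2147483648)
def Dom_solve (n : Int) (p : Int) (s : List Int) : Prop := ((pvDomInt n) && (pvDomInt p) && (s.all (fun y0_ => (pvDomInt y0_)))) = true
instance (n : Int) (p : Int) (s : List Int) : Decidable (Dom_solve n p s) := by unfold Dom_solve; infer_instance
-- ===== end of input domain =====

-- B replaces A's O(p)-per-window inner sum by a prefix-sum list built once (O(1) per window)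
-- and the three scratch arrays + min(list) by a single running-minimum pass.
-- Note: Python A sorts s IN PLACE (caller-visible mutation); B sorts a copy. The claim is about return values only.

-- ===== PORT A =====
def solve (n : Int) (p : Int) (s : List Int) : Int :=
  let t := PySem.List.sorted s (fun x => x) false
  let work_s := (PySem.List.pyRange 0 (n - p + 1) 1).map (fun i =>
    let sum_i := ((PySem.List.pyRange 0 p 1).map (fun j => PySem.List.pyGetD t (i + j) 0)).sum
    let max_i := PySem.List.pyGetD t (i + p - 1) 0
    max_i * p - sum_i)
  (PySem.List.min? work_s (fun x => x)).getD 0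

-- ===== PORT B =====
def solve_alt (n : Int) (p : Int) (s : List Int) : Int :=
  let t := PySem.List.sorted s (fun x => x) false
  let pref := t.foldl (fun acc x => acc ++ [PySem.List.pyGetD acc (-1) 0 + x]) [(0 : Int)]
  let best := (PySem.List.pyRange 0 (n - p + 1) 1).foldl (fun best i =>
    let w := PySem.List.pyGetD t (i + p - 1) 0 * p -
             (PySem.List.pyGetD pref (i + p) 0 - PySem.List.pyGetD pref i 0)
    match best with
    | none => some w
    | some b => if w < b then some w else some b) none
  best.getD 0

-- ===== PRECONDITION & SPEC =====
-- Pre_ excludes p < 0 (a negative window length, outside the problem's domain): there A's value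
-- is an accident of Python negative-index wraparound in s[i+p-1] with an empty inner sum, while
-- B's prefix-sum window is meaningless and raises IndexError or returns another value; every
-- other excluded input (p > n, n > len(s), or p = 0 with empty s) is one where A itself raises.
def Pre_solve (n : Int) (p : Int) (s : List Int) : Prop :=
  0 ≤ p ∧ p ≤ n ∧ n ≤ (s.length : Int) ∧ (1 ≤ p ∨ s ≠ [])
instance (n : Int) (p : Int) (s : List Int) : Decidable (Pre_solve n p s) := by
  unfold Pre_solve; infer_instance
def pvWitness_solve : Int × Int × List Int := (2, 1, [3, 1])

def Spec_solve (n : Int) (p : Int) (s : List Int) (out : Int) : Prop := out = solve_alt n p s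
instance (n : Int) (p : Int) (s : List Int) (out : Int) : Decidable (Spec_solve n p s out) := by unfold Spec_solve; infer_instance

-- ===== CLAIM (what is proved, stated in full; the proofs are below) =====
def Claim_equal_solve : Prop := ∀ (n : Int) (p : Int) (s : List Int), Dom_solve n p s → Pre_solve n p s → Spec_solve n p s (solve n p s)

-- ===== LEMMAS AND PROOFS =====

/-- Running suffix of prefix sums starting after accumulated value `a`. -/
def psums (a : Int) : List Int → List Int
  | [] => []
  | x :: r => (a + x) :: psums (a + x) r

theorem foldl_pref (t : List Int) (acc : List Int) (hne : acc ≠ []) :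
    t.foldl (fun acc x => acc ++ [PySem.List.pyGetD acc (-1) 0 + x]) acc
      = acc ++ psums (acc.getLast hne) t := by
  induction t generalizing acc with
  | nil => simp [psums]
  | cons x r ih =>
    simp only [List.foldl_cons]
    rw [PySem.List.pyGetD_neg_one acc 0 hne]
    rw [ih (acc ++ [acc.getLast hne + x]) (by simp)]
    simp [psums]

theorem psums_getD (t : List Int) (a : Int) (k : Nat) (hk : k < t.length) :
    (psums a t).getD k 0 = a + (t.take (k + 1)).sum := by
  induction t generalizing a k with
  | nil => simp at hk
  | cons x r ih =>
    cases k with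
    | zero => simp [psums]
    | succ m =>
      simp only [psums, List.getD_cons_succ, List.take_succ_cons, List.sum_cons]
      rw [ih (a + x) m (by simpa using hk)]
      ring

theorem pref_getD (t : List Int) (k : Nat) (hk : k ≤ t.length) :
    ((0 : Int) :: psums 0 t).getD k 0 = (t.take k).sum := by
  cases k with
  | zero => simp
  | succ m =>
    simp only [List.getD_cons_succ]
    rw [psums_getD t 0 m (by omega)]
    ring

theorem take_succ_sum (t : List Int) (j : Nat) (hj : j < t.length) :
    (t.take (j + 1)).sum = (t.take j).sum + t.getD j 0 := by
  rw [List.take_add_one, List.getElem?_eq_getElem hj]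
  simp only [Option.toList_some, List.sum_append, List.sum_cons, List.sum_nil, add_zero,
    List.getD, List.getElem?_eq_getElem hj, Option.getD_some]

theorem window_sum (t : List Int) (m q : Nat) (h : m + q ≤ t.length) :
    ((List.range q).map (fun k => t.getD (m + k) 0)).sum
      = (t.take (m + q)).sum - (t.take m).sum := by
  induction q with
  | zero => simp
  | succ q ih =>
    rw [List.range_succ, List.map_append, List.sum_append]
    rw [ih (by omega)]
    simp only [List.map_cons, List.map_nil, List.sum_cons, List.sum_nil]
    rw [show m + (q + 1) = (m + q) + 1 by ring, take_succ_sum t (m + q) (by omega)]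
    ring

theorem foldl_min_opt (f : Int → Int) (l : List Int) (b : Int) :
    l.foldl (fun best i =>
        match best with
        | none => some (f i)
        | some b => if f i < b then some (f i) else some b) (some b)
      = some (l.foldl (fun b i => min b (f i)) b) := by
  induction l generalizing b with
  | nil => rfl
  | cons x r ih =>
    simp only [List.foldl_cons]
    rw [show (if f x < b then some (f x) else some b) = some (min b (f x)) by
      rcases lt_or_ge (f x) b with h | h
      · simp [h, le_of_lt h]
      · simp [not_lt.mpr h, h]]
    exact ih (min b (f x))

theorem foldl_min_congr (g h : Int → Int) (l : List Int) (b : Int)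
    (hgh : ∀ i ∈ l, g i = h i) :
    l.foldl (fun b i => min b (g i)) b = l.foldl (fun b i => min b (h i)) b := by
  induction l generalizing b with
  | nil => rfl
  | cons x r ih =>
    simp only [List.foldl_cons]
    rw [hgh x (by simp), ih (min b (h x)) (fun i hi => hgh i (by simp [hi]))]

-- ===== VERDICT (by name: the statement is the Claim_ definition above) =====
theorem solve_spec : Claim_equal_solve := by
  intro n p s _ hpre
  obtain ⟨hp0, hpn, hns, -⟩ := hpre
  unfold Spec_solve solve solve_alt
  simp only []
  set t := PySem.List.sorted s (fun x => x) false with ht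
  have hlen : (t.length : Int) = (s.length : Int) := by
    rw [ht, PySem.List.length_sorted]
  -- the prefix-sum list of B
  have hpref : t.foldl (fun acc x => acc ++ [PySem.List.pyGetD acc (-1) 0 + x]) [(0 : Int)]
      = (0 : Int) :: psums 0 t := by
    rw [foldl_pref t [(0 : Int)] (by simp)]
    rfl
  rw [hpref]
  -- pointwise equality of the two per-window values on the index range
  have hwin : ∀ i ∈ PySem.List.pyRange 0 (n - p + 1) 1,
      (PySem.List.pyGetD t (i + p - 1) 0 * p -
        ((PySem.List.pyRange 0 p 1).map (fun j => PySem.List.pyGetD t (i + j) 0)).sum)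
      = (PySem.List.pyGetD t (i + p - 1) 0 * p -
        (PySem.List.pyGetD ((0 : Int) :: psums 0 t) (i + p) 0 -
         PySem.List.pyGetD ((0 : Int) :: psums 0 t) i 0)) := by
    intro i hi
    rw [PySem.List.mem_pyRange_one] at hi
    obtain ⟨hi0, hilt⟩ := hi
    have hip : i + p ≤ (t.length : Int) := by omega
    have hsum : ((PySem.List.pyRange 0 p 1).map (fun j => PySem.List.pyGetD t (i + j) 0)).sum
        = (t.take (i.toNat + p.toNat)).sum - (t.take i.toNat).sum := by
      rw [PySem.List.pyRange_one 0 p, List.map_map]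
      have : ∀ k ∈ List.range (p - 0).toNat,
          ((fun j => PySem.List.pyGetD t (i + j) 0) ∘ fun k : Nat => (0 : Int) + k) k
            = t.getD (i.toNat + k) 0 := by
        intro k _
        simp only [Function.comp]
        rw [show i + ((0 : Int) + (k : Int)) = ((i.toNat + k : Nat) : Int) by omega]
        rw [PySem.List.pyGetD_natCast]
      rw [List.map_congr_left this, show ((p : Int) - 0).toNat = p.toNat by omega]
      exact window_sum t i.toNat p.toNat (by omega)
    have hgp : PySem.List.pyGetD ((0 : Int) :: psums 0 t) (i + p) 0
        = (t.take (i.toNat + p.toNat)).sum := by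
      rw [show i + p = ((i.toNat + p.toNat : Nat) : Int) by omega, PySem.List.pyGetD_natCast]
      exact pref_getD t (i.toNat + p.toNat) (by omega)
    have hgi : PySem.List.pyGetD ((0 : Int) :: psums 0 t) i 0 = (t.take i.toNat).sum := by
      rw [show i = ((i.toNat : Nat) : Int) by omega, PySem.List.pyGetD_natCast]
      exact pref_getD t i.toNat (by omega)
    rw [hsum, hgp, hgi]
  -- both sides are the running minimum of the same values over the same range
  have hne : 0 < n - p + 1 := by omega
  rw [PySem.List.pyRange_one_cons (by omega : (0 : Int) < n - p + 1)]
  set r := PySem.List.pyRange (0 + 1) (n - p + 1) 1 with hr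
  set fA := fun i => PySem.List.pyGetD t (i + p - 1) 0 * p -
      ((PySem.List.pyRange 0 p 1).map (fun j => PySem.List.pyGetD t (i + j) 0)).sum with hfA
  set fB := fun i => PySem.List.pyGetD t (i + p - 1) 0 * p -
      (PySem.List.pyGetD ((0 : Int) :: psums 0 t) (i + p) 0 -
       PySem.List.pyGetD ((0 : Int) :: psums 0 t) i 0) with hfB
  have hmem0 : (0 : Int) ∈ PySem.List.pyRange 0 (n - p + 1) 1 := by
    rw [PySem.List.mem_pyRange_one]; omega
  have hmemr : ∀ i ∈ r, i ∈ PySem.List.pyRange 0 (n - p + 1) 1 := by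
    intro i hi
    rw [hr, PySem.List.mem_pyRange_one] at hi
    rw [PySem.List.mem_pyRange_one]; omega
  -- A side: min? of the mapped list is a fold of min
  rw [List.map_cons, PySem.List.min?_id_cons, List.foldl_map]
  -- B side: the option fold
  rw [List.foldl_cons]
  simp only []
  rw [foldl_min_opt fB r (fB 0)]
  simp only [Option.getD_some]
  rw [show fA 0 = fB 0 from hwin 0 hmem0]
  exact foldl_min_congr fA fB r (fB 0) (fun i hi => hwin i (hmemr i hi)) ▸ rfl
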